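-- pv_equiv track=rewrite | github.com/Calum-Kerr/Last-Try | project/text_attributes/font_weight_handling.py | get_closest_weight_name
-- ===== SOURCE A (Python) =====
-- from typing import Dict, Any, Union, Literal
--
-- WEIGHT_MAP = {
--     'thin': 100,
--     'extra-light': 200,
--     'light': 300,
--     'normal': 400,
--     'regular': 400,
--     'medium': 500,
--     'semi-bold': 600,
--     'bold': 700,
--     'extra-bold': 800,
--     'black': 900
-- }
--
-- WeightType = Literal['thin', 'extra-light', 'light', 'normal', 'medium', 'semi-bold', 'bold', 'extra-bold', 'black']
--
-- def get_closest_weight_name(numeric_weight: int) -> WeightType: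
--     """Get the closest standard weight name for a numeric weight"""
--     min_diff = float('inf')
--     closest = 'normal'
--
--     for name, value in WEIGHT_MAP.items():
--         diff = abs(value - numeric_weight)
--         if diff < min_diff:
--             min_diff = diff
--             closest = name
--
--     return closest
-- ===== SOURCE B (Python) =====
-- # Closed-form: weights are exactly 100..900 in steps of 100, so round to the
-- # nearest hundred (ties broken downward, matching A's strict-< first-wins scan),
-- # clamp to [1,9] and look the name up directly -- no loop over the map.
--
-- NAMES = ['thin', 'extra-light', 'light', 'normal', 'medium',
--          'semi-bold', 'bold', 'extra-bold', 'black']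
--
-- def get_closest_weight_name(numeric_weight: int) -> str:
--     k = (numeric_weight + 49) // 100
--     if k < 1:
--         k = 1
--     if k > 9:
--         k = 9
--     return NAMES[k - 1]
-- ===== Notes on version B (the rewrite author's own statement) =====
-- stated objective: alternative
-- what changed: Replaces the linear scan over WEIGHT_MAP (tracking the minimum absolute difference) with closed-form arithmetic: floor-divide the shifted weight to round to the nearest hundred with half-ties broken downward, clamp, and index a 9-entry name table once.
import Mathlib
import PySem

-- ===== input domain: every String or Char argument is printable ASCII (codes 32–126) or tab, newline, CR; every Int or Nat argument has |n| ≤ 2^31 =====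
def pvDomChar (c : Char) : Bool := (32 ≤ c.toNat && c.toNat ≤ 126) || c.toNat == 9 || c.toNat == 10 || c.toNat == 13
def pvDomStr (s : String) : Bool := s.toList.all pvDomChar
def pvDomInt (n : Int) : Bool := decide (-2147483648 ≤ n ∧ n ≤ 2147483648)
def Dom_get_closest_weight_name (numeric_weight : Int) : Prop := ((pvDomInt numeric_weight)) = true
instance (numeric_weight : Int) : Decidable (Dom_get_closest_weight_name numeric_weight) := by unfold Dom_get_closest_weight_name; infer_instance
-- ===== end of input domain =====

-- B replaces A's scan over the weight map by closed-form rounding to the nearest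
-- hundred (half-ties downward, as A's strict-< first-wins scan breaks them),
-- a clamp to [1,9] and one list lookup.

-- ===== PORT A =====

-- Python's abs() on ints (|x| as an Int)
def pyAbs (x : Int) : Int := (x.natAbs : Int)

-- WEIGHT_MAP in insertion order
def weightMap : List (String × Int) :=
  [("thin", 100), ("extra-light", 200), ("light", 300), ("normal", 400),
   ("regular", 400), ("medium", 500), ("semi-bold", 600), ("bold", 700),
   ("extra-bold", 800), ("black", 900)]

-- the for-loop over WEIGHT_MAP.items(), as structural recursion on the list;
-- state = (min_diff, closest); min_diff starts at float('inf'), modelled as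
-- `none` (every int diff compares < inf, the `none` match arm)
def weightLoop (numeric_weight : Int) :
    List (String × Int) → Option Int × String → Option Int × String
  | [], st => st
  | (name, value) :: rest, st =>
    let diff := pyAbs (value - numeric_weight)
    match st.1 with
    | none => weightLoop numeric_weight rest (some diff, name)
    | some m =>
      if diff < m then weightLoop numeric_weight rest (some diff, name)
      else weightLoop numeric_weight rest st

def get_closest_weight_name (numeric_weight : Int) : String :=
  (weightLoop numeric_weight weightMap (none, "normal")).2

-- ===== PORT B =====

def namesB : List String :=
  ["thin", "extra-light", "light", "normal", "medium",
   "semi-bold", "bold", "extra-bold", "black"]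

def get_closest_weight_name_alt (numeric_weight : Int) : String :=
  let k0 := PySem.Int.floordiv (numeric_weight + 49) 100
  let k1 := if k0 < 1 then 1 else k0
  let k2 := if k1 > 9 then 9 else k1
  -- after the clamp, k2 - 1 ∈ [0,8]: the index is always in range, so the
  -- `getD ""` default is unreachable (Python's NAMES[k-1] never raises here)
  (PySem.List.pyGet? namesB (k2 - 1)).getD ""

-- ===== PRECONDITION & SPEC =====
def Spec_get_closest_weight_name (numeric_weight : Int) (out : String) : Prop := out = get_closest_weight_name_alt numeric_weight
instance (numeric_weight : Int) (out : String) : Decidable (Spec_get_closest_weight_name numeric_weight out) := by unfold Spec_get_closest_weight_name; infer_instance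

-- ===== CLAIM (what is proved, stated in full; the proofs are below) =====
def Claim_equal_get_closest_weight_name : Prop := ∀ (numeric_weight : Int), Dom_get_closest_weight_name numeric_weight → Spec_get_closest_weight_name numeric_weight (get_closest_weight_name numeric_weight)

-- ===== LEMMAS AND PROOFS =====

-- the common interval characterisation both ports satisfy
def weightChain (n : Int) : String :=
  if n ≤ 150 then "thin"
  else if n ≤ 250 then "extra-light"
  else if n ≤ 350 then "light"
  else if n ≤ 450 then "normal"
  else if n ≤ 550 then "medium"
  else if n ≤ 650 then "semi-bold"
  else if n ≤ 750 then "bold"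
  else if n ≤ 850 then "extra-bold"
  else "black"

lemma pvA_case_1 (n : Int) (h2 : n ≤ 150) : get_closest_weight_name n = "thin" := by
  simp only [get_closest_weight_name, weightMap, weightLoop,
    if_neg (show ¬ (pyAbs (200 - n) < pyAbs (100 - n)) from by simp only [pyAbs]; omega),
    if_neg (show ¬ (pyAbs (300 - n) < pyAbs (100 - n)) from by simp only [pyAbs]; omega),
    if_neg (show ¬ (pyAbs (400 - n) < pyAbs (100 - n)) from by simp only [pyAbs]; omega),
    if_neg (show ¬ (pyAbs (500 - n) < pyAbs (100 - n)) from by simp only [pyAbs]; omega),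
    if_neg (show ¬ (pyAbs (600 - n) < pyAbs (100 - n)) from by simp only [pyAbs]; omega),
    if_neg (show ¬ (pyAbs (700 - n) < pyAbs (100 - n)) from by simp only [pyAbs]; omega),
    if_neg (show ¬ (pyAbs (800 - n) < pyAbs (100 - n)) from by simp only [pyAbs]; omega),
    if_neg (show ¬ (pyAbs (900 - n) < pyAbs (100 - n)) from by simp only [pyAbs]; omega)]

lemma pvA_case_2 (n : Int) (h1 : 151 ≤ n) (h2 : n ≤ 250) : get_closest_weight_name n = "extra-light" := by
  simp only [get_closest_weight_name, weightMap, weightLoop,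
    if_pos (show pyAbs (200 - n) < pyAbs (100 - n) from by simp only [pyAbs]; omega),
    if_neg (show ¬ (pyAbs (300 - n) < pyAbs (200 - n)) from by simp only [pyAbs]; omega),
    if_neg (show ¬ (pyAbs (400 - n) < pyAbs (200 - n)) from by simp only [pyAbs]; omega),
    if_neg (show ¬ (pyAbs (500 - n) < pyAbs (200 - n)) from by simp only [pyAbs]; omega),
    if_neg (show ¬ (pyAbs (600 - n) < pyAbs (200 - n)) from by simp only [pyAbs]; omega),
    if_neg (show ¬ (pyAbs (700 - n) < pyAbs (200 - n)) from by simp only [pyAbs]; omega),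
    if_neg (show ¬ (pyAbs (800 - n) < pyAbs (200 - n)) from by simp only [pyAbs]; omega),
    if_neg (show ¬ (pyAbs (900 - n) < pyAbs (200 - n)) from by simp only [pyAbs]; omega)]

lemma pvA_case_3 (n : Int) (h1 : 251 ≤ n) (h2 : n ≤ 350) : get_closest_weight_name n = "light" := by
  simp only [get_closest_weight_name, weightMap, weightLoop,
    if_pos (show pyAbs (200 - n) < pyAbs (100 - n) from by simp only [pyAbs]; omega),
    if_pos (show pyAbs (300 - n) < pyAbs (200 - n) from by simp only [pyAbs]; omega),
    if_neg (show ¬ (pyAbs (400 - n) < pyAbs (300 - n)) from by simp only [pyAbs]; omega),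
    if_neg (show ¬ (pyAbs (500 - n) < pyAbs (300 - n)) from by simp only [pyAbs]; omega),
    if_neg (show ¬ (pyAbs (600 - n) < pyAbs (300 - n)) from by simp only [pyAbs]; omega),
    if_neg (show ¬ (pyAbs (700 - n) < pyAbs (300 - n)) from by simp only [pyAbs]; omega),
    if_neg (show ¬ (pyAbs (800 - n) < pyAbs (300 - n)) from by simp only [pyAbs]; omega),
    if_neg (show ¬ (pyAbs (900 - n) < pyAbs (300 - n)) from by simp only [pyAbs]; omega)]

lemma pvA_case_4 (n : Int) (h1 : 351 ≤ n) (h2 : n ≤ 450) : get_closest_weight_name n = "normal" := by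
  simp only [get_closest_weight_name, weightMap, weightLoop,
    if_pos (show pyAbs (200 - n) < pyAbs (100 - n) from by simp only [pyAbs]; omega),
    if_pos (show pyAbs (300 - n) < pyAbs (200 - n) from by simp only [pyAbs]; omega),
    if_pos (show pyAbs (400 - n) < pyAbs (300 - n) from by simp only [pyAbs]; omega),
    if_neg (show ¬ (pyAbs (400 - n) < pyAbs (400 - n)) from by simp only [pyAbs]; omega),
    if_neg (show ¬ (pyAbs (500 - n) < pyAbs (400 - n)) from by simp only [pyAbs]; omega),
    if_neg (show ¬ (pyAbs (600 - n) < pyAbs (400 - n)) from by simp only [pyAbs]; omega),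
    if_neg (show ¬ (pyAbs (700 - n) < pyAbs (400 - n)) from by simp only [pyAbs]; omega),
    if_neg (show ¬ (pyAbs (800 - n) < pyAbs (400 - n)) from by simp only [pyAbs]; omega),
    if_neg (show ¬ (pyAbs (900 - n) < pyAbs (400 - n)) from by simp only [pyAbs]; omega)]

lemma pvA_case_5 (n : Int) (h1 : 451 ≤ n) (h2 : n ≤ 550) : get_closest_weight_name n = "medium" := by
  simp only [get_closest_weight_name, weightMap, weightLoop,
    if_pos (show pyAbs (200 - n) < pyAbs (100 - n) from by simp only [pyAbs]; omega),
    if_pos (show pyAbs (300 - n) < pyAbs (200 - n) from by simp only [pyAbs]; omega),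
    if_pos (show pyAbs (400 - n) < pyAbs (300 - n) from by simp only [pyAbs]; omega),
    if_neg (show ¬ (pyAbs (400 - n) < pyAbs (400 - n)) from by simp only [pyAbs]; omega),
    if_pos (show pyAbs (500 - n) < pyAbs (400 - n) from by simp only [pyAbs]; omega),
    if_neg (show ¬ (pyAbs (600 - n) < pyAbs (500 - n)) from by simp only [pyAbs]; omega),
    if_neg (show ¬ (pyAbs (700 - n) < pyAbs (500 - n)) from by simp only [pyAbs]; omega),
    if_neg (show ¬ (pyAbs (800 - n) < pyAbs (500 - n)) from by simp only [pyAbs]; omega),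
    if_neg (show ¬ (pyAbs (900 - n) < pyAbs (500 - n)) from by simp only [pyAbs]; omega)]

lemma pvA_case_6 (n : Int) (h1 : 551 ≤ n) (h2 : n ≤ 650) : get_closest_weight_name n = "semi-bold" := by
  simp only [get_closest_weight_name, weightMap, weightLoop,
    if_pos (show pyAbs (200 - n) < pyAbs (100 - n) from by simp only [pyAbs]; omega),
    if_pos (show pyAbs (300 - n) < pyAbs (200 - n) from by simp only [pyAbs]; omega),
    if_pos (show pyAbs (400 - n) < pyAbs (300 - n) from by simp only [pyAbs]; omega),
    if_neg (show ¬ (pyAbs (400 - n) < pyAbs (400 - n)) from by simp only [pyAbs]; omega),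
    if_pos (show pyAbs (500 - n) < pyAbs (400 - n) from by simp only [pyAbs]; omega),
    if_pos (show pyAbs (600 - n) < pyAbs (500 - n) from by simp only [pyAbs]; omega),
    if_neg (show ¬ (pyAbs (700 - n) < pyAbs (600 - n)) from by simp only [pyAbs]; omega),
    if_neg (show ¬ (pyAbs (800 - n) < pyAbs (600 - n)) from by simp only [pyAbs]; omega),
    if_neg (show ¬ (pyAbs (900 - n) < pyAbs (600 - n)) from by simp only [pyAbs]; omega)]

lemma pvA_case_7 (n : Int) (h1 : 651 ≤ n) (h2 : n ≤ 750) : get_closest_weight_name n = "bold" := by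
  simp only [get_closest_weight_name, weightMap, weightLoop,
    if_pos (show pyAbs (200 - n) < pyAbs (100 - n) from by simp only [pyAbs]; omega),
    if_pos (show pyAbs (300 - n) < pyAbs (200 - n) from by simp only [pyAbs]; omega),
    if_pos (show pyAbs (400 - n) < pyAbs (300 - n) from by simp only [pyAbs]; omega),
    if_neg (show ¬ (pyAbs (400 - n) < pyAbs (400 - n)) from by simp only [pyAbs]; omega),
    if_pos (show pyAbs (500 - n) < pyAbs (400 - n) from by simp only [pyAbs]; omega),
    if_pos (show pyAbs (600 - n) < pyAbs (500 - n) from by simp only [pyAbs]; omega),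
    if_pos (show pyAbs (700 - n) < pyAbs (600 - n) from by simp only [pyAbs]; omega),
    if_neg (show ¬ (pyAbs (800 - n) < pyAbs (700 - n)) from by simp only [pyAbs]; omega),
    if_neg (show ¬ (pyAbs (900 - n) < pyAbs (700 - n)) from by simp only [pyAbs]; omega)]

lemma pvA_case_8 (n : Int) (h1 : 751 ≤ n) (h2 : n ≤ 850) : get_closest_weight_name n = "extra-bold" := by
  simp only [get_closest_weight_name, weightMap, weightLoop,
    if_pos (show pyAbs (200 - n) < pyAbs (100 - n) from by simp only [pyAbs]; omega),
    if_pos (show pyAbs (300 - n) < pyAbs (200 - n) from by simp only [pyAbs]; omega),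
    if_pos (show pyAbs (400 - n) < pyAbs (300 - n) from by simp only [pyAbs]; omega),
    if_neg (show ¬ (pyAbs (400 - n) < pyAbs (400 - n)) from by simp only [pyAbs]; omega),
    if_pos (show pyAbs (500 - n) < pyAbs (400 - n) from by simp only [pyAbs]; omega),
    if_pos (show pyAbs (600 - n) < pyAbs (500 - n) from by simp only [pyAbs]; omega),
    if_pos (show pyAbs (700 - n) < pyAbs (600 - n) from by simp only [pyAbs]; omega),
    if_pos (show pyAbs (800 - n) < pyAbs (700 - n) from by simp only [pyAbs]; omega),
    if_neg (show ¬ (pyAbs (900 - n) < pyAbs (800 - n)) from by simp only [pyAbs]; omega)]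

lemma pvA_case_9 (n : Int) (h1 : 851 ≤ n) : get_closest_weight_name n = "black" := by
  simp only [get_closest_weight_name, weightMap, weightLoop,
    if_pos (show pyAbs (200 - n) < pyAbs (100 - n) from by simp only [pyAbs]; omega),
    if_pos (show pyAbs (300 - n) < pyAbs (200 - n) from by simp only [pyAbs]; omega),
    if_pos (show pyAbs (400 - n) < pyAbs (300 - n) from by simp only [pyAbs]; omega),
    if_neg (show ¬ (pyAbs (400 - n) < pyAbs (400 - n)) from by simp only [pyAbs]; omega),
    if_pos (show pyAbs (500 - n) < pyAbs (400 - n) from by simp only [pyAbs]; omega),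
    if_pos (show pyAbs (600 - n) < pyAbs (500 - n) from by simp only [pyAbs]; omega),
    if_pos (show pyAbs (700 - n) < pyAbs (600 - n) from by simp only [pyAbs]; omega),
    if_pos (show pyAbs (800 - n) < pyAbs (700 - n) from by simp only [pyAbs]; omega),
    if_pos (show pyAbs (900 - n) < pyAbs (800 - n) from by simp only [pyAbs]; omega)]

set_option maxHeartbeats 1000000 in
lemma portB_eq_chain (n : Int) : get_closest_weight_name_alt n = weightChain n := by
  have hd : PySem.Int.floordiv (n + 49) 100 = (n + 49) / 100 :=
    PySem.Int.floordiv_eq_ediv_of_pos (by norm_num)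
  simp only [get_closest_weight_name_alt, hd, weightChain]
  rcases (show (n + 49) / 100 < 1 ∨ (n + 49) / 100 = 1 ∨ (n + 49) / 100 = 2 ∨
      (n + 49) / 100 = 3 ∨ (n + 49) / 100 = 4 ∨ (n + 49) / 100 = 5 ∨
      (n + 49) / 100 = 6 ∨ (n + 49) / 100 = 7 ∨ (n + 49) / 100 = 8 ∨
      (n + 49) / 100 = 9 ∨ 9 < (n + 49) / 100 by omega) with
    hk | hk | hk | hk | hk | hk | hk | hk | hk | hk | hk
  all_goals first
  | (rw [if_pos hk]
     norm_num [namesB, PySem.List.pyGet?]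
     split_ifs <;> first | rfl | omega)
  | (rw [hk]
     norm_num [namesB, PySem.List.pyGet?]
     split_ifs <;> first | rfl | omega)
  | (rw [if_neg (by omega : ¬ (n + 49) / 100 < 1), if_pos (by omega : (n + 49) / 100 > 9)]
     norm_num [namesB, PySem.List.pyGet?]
     split_ifs <;> first | rfl | omega)

lemma portA_eq_chain (n : Int) : get_closest_weight_name n = weightChain n := by
  unfold weightChain
  split_ifs with c1 c2 c3 c4 c5 c6 c7 c8
  · exact pvA_case_1 n c1
  · exact pvA_case_2 n (by omega) c2
  · exact pvA_case_3 n (by omega) c3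
  · exact pvA_case_4 n (by omega) c4
  · exact pvA_case_5 n (by omega) c5
  · exact pvA_case_6 n (by omega) c6
  · exact pvA_case_7 n (by omega) c7
  · exact pvA_case_8 n (by omega) c8
  · exact pvA_case_9 n (by omega)

-- ===== VERDICT (by name: the statement is the Claim_ definition above) =====
theorem get_closest_weight_name_spec : Claim_equal_get_closest_weight_name := by
  intro n _
  unfold Spec_get_closest_weight_name
  rw [portA_eq_chain, portB_eq_chain]
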